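-- pv_equiv track=rewrite | github.com/yasamanrazeghi7/TermFrequency | regex_utils.py | text_window_slider
-- ===== SOURCE A (Python) =====
-- def text_window_slider(text: str, window_size: int):
--     ret_list = []
--     tokens = text.split()
--     window = [None]*(window_size * 2 + 1)
--     for token in (tokens + [None] * (window_size*2+1)):
--         window.pop(0)
--         window.append(token)
--         ret_list.append(list(window))
--     return ret_list
-- ===== SOURCE B (Python) =====
-- def text_window_slider(text: str, window_size: int):
--     tokens = text.split()
--     w = window_size * 2 + 1
--     padded = [None] * w + tokens + [None] * w
--     return [padded[j:j + w] for j in range(1, len(tokens) + w + 1)]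
-- ===== Notes on version B (the rewrite author's own statement) =====
-- stated objective: idiomatic
-- what changed: B replaces A's incrementally maintained pop/append sliding queue with a single padded buffer that is sliced at each offset, eliminating all mutable window state.
-- outside the precondition, e.g. on text_window_slider('x y', -1): A raises IndexError, B returns [[]]
import Mathlib
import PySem

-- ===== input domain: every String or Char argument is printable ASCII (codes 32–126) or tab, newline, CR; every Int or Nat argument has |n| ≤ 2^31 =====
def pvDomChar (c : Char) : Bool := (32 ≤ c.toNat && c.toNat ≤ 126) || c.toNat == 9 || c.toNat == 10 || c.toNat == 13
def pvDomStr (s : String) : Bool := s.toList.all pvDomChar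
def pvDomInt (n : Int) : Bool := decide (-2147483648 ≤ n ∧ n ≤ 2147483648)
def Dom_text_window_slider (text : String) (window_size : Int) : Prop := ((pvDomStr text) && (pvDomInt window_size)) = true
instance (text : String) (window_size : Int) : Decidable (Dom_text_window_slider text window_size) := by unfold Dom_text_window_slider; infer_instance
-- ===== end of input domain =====

-- B replaces A's pop/append sliding queue with one padded buffer sliced at each offset (idiomatic; same cost).


-- ===== PORT A =====
-- loop body of A: window.pop(0); window.append(token); ret_list.append(list(window))
def twsStep (st : List (Option String) × List (List (Option String))) (token : Option String) :
    List (Option String) × List (List (Option String)) :=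
  match PySem.List.pop? st.1 0 with
  | some (_, rest) => (rest ++ [token], st.2 ++ [rest ++ [token]])
  | none => st    -- Python raises IndexError here (pop from empty window); excluded by Pre_

def text_window_slider (text : String) (window_size : Int) : List (List (Option String)) :=
  let tokens : List (Option String) := (PySem.Str.split₀ text).map some
  let window : List (Option String) := List.replicate (window_size * 2 + 1).toNat none
  ((tokens ++ List.replicate (window_size * 2 + 1).toNat none).foldl twsStep (window, [])).2

-- ===== PORT B =====
def text_window_slider_alt (text : String) (window_size : Int) : List (List (Option String)) :=
  let tokens : List (Option String) := (PySem.Str.split₀ text).map some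
  let w : Int := window_size * 2 + 1
  let padded : List (Option String) :=
    List.replicate w.toNat none ++ tokens ++ List.replicate w.toNat none
  (PySem.List.pyRange 1 ((tokens.length : Int) + w + 1) 1).map
    (fun j => PySem.List.slice padded (some j) (some (j + w)))

-- ===== PRECONDITION & SPEC =====
-- Pre_ excludes negative window_size together with a non-empty token list: there A pops from an
-- empty window and raises IndexError (returns no value).
def Pre_text_window_slider (text : String) (window_size : Int) : Prop :=
  0 ≤ window_size ∨ PySem.Str.split₀ text = []
instance (text : String) (window_size : Int) : Decidable (Pre_text_window_slider text window_size) := by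
  unfold Pre_text_window_slider; infer_instance

def pvWitness_text_window_slider : String × Int := ("a b", 1)

def Spec_text_window_slider (text : String) (window_size : Int) (out : List (List (Option String))) : Prop := out = text_window_slider_alt text window_size
instance (text : String) (window_size : Int) (out : List (List (Option String))) : Decidable (Spec_text_window_slider text window_size out) := by unfold Spec_text_window_slider; infer_instance

-- ===== CLAIM (what is proved, stated in full; the proofs are below) =====
def Claim_equal_text_window_slider : Prop := ∀ (text : String) (window_size : Int), Dom_text_window_slider text window_size → Pre_text_window_slider text window_size → Spec_text_window_slider text window_size (text_window_slider text window_size)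

-- ===== LEMMAS AND PROOFS =====

-- Invariant of A's loop: after folding S over a window of fixed positive length W,
-- the collected rows are the successive W-windows of win ++ S starting at offset 1.
theorem twsStep_foldl (W : Nat) (hW : 1 ≤ W) :
    ∀ (S : List (Option String)) (win : List (Option String)) (acc : List (List (Option String))),
      win.length = W →
      (S.foldl twsStep (win, acc)).2
        = acc ++ (List.range S.length).map (fun k => ((win ++ S).drop (k + 1)).take W) := by
  intro S
  induction S with
  | nil => intro win acc _; simp
  | cons t rest ih =>
    intro win acc hlen
    cases win with
    | nil => simp at hlen; omega
    | cons h w' =>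
      have hw' : w'.length = W - 1 := by simp at hlen; omega
      have hstep : twsStep (h :: w', acc) t = (w' ++ [t], acc ++ [w' ++ [t]]) := by
        simp [twsStep, PySem.List.pop?_zero_cons]
      have hlen' : (w' ++ [t]).length = W := by simp [hw']; omega
      calc ((t :: rest).foldl twsStep (h :: w', acc)).2
          = (rest.foldl twsStep (w' ++ [t], acc ++ [w' ++ [t]])).2 := by
            simp [List.foldl_cons, hstep]
        _ = acc ++ [w' ++ [t]]
              ++ (List.range rest.length).map (fun k => (((w' ++ [t]) ++ rest).drop (k + 1)).take W) := by
            exact ih (w' ++ [t]) (acc ++ [w' ++ [t]]) hlen'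
        _ = acc ++ (List.range (t :: rest).length).map
              (fun k => (((h :: w') ++ t :: rest).drop (k + 1)).take W) := by
            rw [List.length_cons, List.range_succ_eq_map]
            simp only [List.map_cons, List.map_map]
            have h0 : (((h :: w') ++ t :: rest).drop 1).take W = w' ++ [t] := by
              have hWw : W = w'.length + 1 := by omega
              simp only [List.cons_append, List.drop_succ_cons, List.drop_zero, hWw,
                List.take_length_add_append]
              simp
            have h1 : (fun k => (((h :: w') ++ t :: rest).drop (k + 1)).take W) ∘ Nat.succ
                = fun k => (((w' ++ [t]) ++ rest).drop (k + 1)).take W := by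
              funext k
              simp only [Function.comp, Nat.succ_eq_add_one]
              congr 1
              simp [List.drop_succ_cons, List.append_assoc]
            rw [h0, h1]
            simp

theorem text_window_slider_spec : Claim_equal_text_window_slider := by
  unfold Claim_equal_text_window_slider
  intro text window_size _ hpre
  unfold Spec_text_window_slider
  have hA : text_window_slider text window_size
      = ((((PySem.Str.split₀ text).map some) ++ List.replicate (window_size * 2 + 1).toNat none).foldl
          twsStep (List.replicate (window_size * 2 + 1).toNat none, [])).2 := rfl
  have hB : text_window_slider_alt text window_size
      = (PySem.List.pyRange 1 (((((PySem.Str.split₀ text).map some).length : Int)) + (window_size * 2 + 1) + 1) 1).map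
          (fun j => PySem.List.slice
            (List.replicate (window_size * 2 + 1).toNat none ++ ((PySem.Str.split₀ text).map some)
              ++ List.replicate (window_size * 2 + 1).toNat none)
            (some j) (some (j + (window_size * 2 + 1)))) := rfl
  rw [hA, hB]
  by_cases hw : 0 ≤ window_size
  · have hWcast : (((window_size * 2 + 1).toNat : Nat) : Int) = window_size * 2 + 1 :=
      Int.toNat_of_nonneg (by omega)
    have hW1 : 1 ≤ (window_size * 2 + 1).toNat := by omega
    rw [twsStep_foldl ((window_size * 2 + 1).toNat) hW1 _ _ []
          (by simp : (List.replicate (window_size * 2 + 1).toNat (none : Option String)).length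
                = (window_size * 2 + 1).toNat)]
    rw [PySem.List.pyRange_one]
    have hb : ((((PySem.Str.split₀ text).map some).length : Int) + (window_size * 2 + 1) + 1 - 1).toNat
        = ((PySem.Str.split₀ text).map some).length + (window_size * 2 + 1).toNat := by omega
    rw [hb]
    simp only [List.nil_append, List.map_map, List.length_append, List.length_replicate]
    apply List.map_congr_left
    intro k _
    have hj : (1 : Int) + (k : Int) = ((k + 1 : Nat) : Int) := by push_cast; ring
    simp only [Function.comp]
    rw [hj]
    rw [show ((k + 1 : Nat) : Int) + (window_size * 2 + 1)
          = ((k + 1 : Nat) : Int) + (((window_size * 2 + 1).toNat : Nat) : Int) from by rw [hWcast]]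
    rw [PySem.List.slice_natCast_add]
    simp [List.append_assoc]
  · have htok : PySem.Str.split₀ text = [] := by
      rcases hpre with h | h
      · omega
      · exact h
    have hzero : (window_size * 2 + 1).toNat = 0 := by omega
    simp only [htok, List.map_nil, List.length_nil, Nat.cast_zero, hzero, List.replicate_zero,
      List.append_nil, List.foldl_nil]
    rw [PySem.List.pyRange_one_eq_nil (by omega : (0 : Int) + (window_size * 2 + 1) + 1 ≤ 1)]
    simp
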